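-- pv_equiv track=rewrite | github.com/guptagyan/my-portfolio | mainapp/anpr_core.py | clean_and_correct
-- ===== SOURCE A (Python) =====
-- ALLOWED_CHARS = "ABCDEFGHIJKLMNOPQRSTUVWXYZ0123456789"
--
-- MAP_LETTER_TO_NUM = {
--   'O': '0', 'D': '0', 'Q': '0', 'I': '1', 'L': '1', 'Z': '2',
--   'S': '5', 'B': '8', 'G': '6', 'E': '3', 'J': '3', 'T': '7', 'A': '4'
-- }
--
-- MAP_NUM_TO_LETTER = {
--   '0': 'O', '1': 'I', '2': 'Z', '5': 'S', '8': 'B',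
--   '6': 'G', '3': 'E', '7': 'T', '4': 'A'
-- }
--
-- def clean_and_correct(text):
--   """
--   टेक्स्ट को साफ करता है और लंबाई के आधार पर 9 (LLNNLNNNN) या 10 (LLNNLLNNNN)
--   कैरेक्टर पैटर्न लागू करता है।
--   """
--   cleaned_text = "".join(filter(lambda ch: ch in ALLOWED_CHARS, text.upper()))
--   length = len(cleaned_text)
--   final_plate = ""
--
--   # केस 1: अगर लंबाई 10 है (LLNNLLNNNN)
--   if length == 10:
--     for i, char in enumerate(cleaned_text):
--       if i in [0, 1, 4, 5]: # LL / LL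
--         final_plate += MAP_NUM_TO_LETTER.get(char, char)
--       elif i in [2, 3, 6, 7, 8, 9]: # NN / NNNN
--         final_plate += MAP_LETTER_TO_NUM.get(char, char)
--
--   # केस 2: अगर लंबाई 9 है (LLNNLNNNN)
--   elif length == 9:
--     for i, char in enumerate(cleaned_text):
--       if i in [0, 1, 4]: # LL / L
--         final_plate += MAP_NUM_TO_LETTER.get(char, char)
--       elif i in [2, 3, 5, 6, 7, 8]: # NN / NNNN
--         final_plate += MAP_LETTER_TO_NUM.get(char, char)
--
--   else:
--     return cleaned_text # बिना पोज़ीशनल करेक्शन के लौटा दें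
--
--   return final_plate
-- ===== SOURCE B (Python) =====
-- ALLOWED_CHARS = "ABCDEFGHIJKLMNOPQRSTUVWXYZ0123456789"
--
-- # Whole-string translation tables (str.translate), built once.
-- TO_NUM = str.maketrans({
--   'O': '0', 'D': '0', 'Q': '0', 'I': '1', 'L': '1', 'Z': '2',
--   'S': '5', 'B': '8', 'G': '6', 'E': '3', 'J': '3', 'T': '7', 'A': '4'})
--
-- TO_LETTER = str.maketrans({
--   '0': 'O', '1': 'I', '2': 'Z', '5': 'S', '8': 'B',
--   '6': 'G', '3': 'E', '7': 'T', '4': 'A'})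
--
-- def clean_and_correct(text):
--   cleaned = "".join(ch for ch in text.upper() if ch in ALLOWED_CHARS)
--   n = len(cleaned)
--   if n not in (9, 10):
--     return cleaned
--   # Translate the whole plate both ways, then splice the blocks:
--   # letters from positions [0:2] and [4:n-4], digits from [2:4] and [n-4:].
--   letters = cleaned.translate(TO_LETTER)
--   digits = cleaned.translate(TO_NUM)
--   cut = n - 4
--   return letters[:2] + digits[2:4] + letters[4:cut] + digits[cut:]
-- ===== Notes on version B (the rewrite author's own statement) =====
-- stated objective: alternative
-- what changed: Instead of classifying each position inside a loop via hard-coded index lists, B translates the whole cleaned string twice (str.translate to an all-letter and an all-digit version) and splices four fixed slices of those two copies; there is no per-character branching at all.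
import Mathlib
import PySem

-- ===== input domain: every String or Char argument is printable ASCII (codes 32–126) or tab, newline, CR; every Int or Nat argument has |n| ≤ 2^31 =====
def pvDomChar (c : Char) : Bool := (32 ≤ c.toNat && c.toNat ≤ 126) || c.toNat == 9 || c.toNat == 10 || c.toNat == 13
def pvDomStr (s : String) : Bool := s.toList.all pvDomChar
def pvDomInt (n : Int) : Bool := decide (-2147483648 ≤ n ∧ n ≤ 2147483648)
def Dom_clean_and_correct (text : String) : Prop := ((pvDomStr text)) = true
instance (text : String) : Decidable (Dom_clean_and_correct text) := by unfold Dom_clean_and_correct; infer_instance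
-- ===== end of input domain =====

-- B replaces A's per-position branching loops by two whole-string translations spliced by four slices (alternative decomposition, same cost).

-- ===== PORT A =====
def pvAllowed : List Char := "ABCDEFGHIJKLMNOPQRSTUVWXYZ0123456789".toList

def pvMapL2N : PySem.Dict Char Char := PySem.Dict.ofList
  [('O','0'),('D','0'),('Q','0'),('I','1'),('L','1'),('Z','2'),
   ('S','5'),('B','8'),('G','6'),('E','3'),('J','3'),('T','7'),('A','4')]

def pvMapN2L : PySem.Dict Char Char := PySem.Dict.ofList
  [('0','O'),('1','I'),('2','Z'),('5','S'),('8','B'),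
   ('6','G'),('3','E'),('7','T'),('4','A')]

def clean_and_correct (text : String) : String :=
  let cleaned : List Char := (PySem.Str.upper text).toList.filter (fun ch => pvAllowed.contains ch)
  let length := cleaned.length
  if length = 10 then
    String.mk ((PySem.List.enumerate cleaned).foldl (fun acc p =>
      if p.1 ∈ [(0:Int),1,4,5] then acc ++ [pvMapN2L.getD p.2 p.2]
      else if p.1 ∈ [(2:Int),3,6,7,8,9] then acc ++ [pvMapL2N.getD p.2 p.2]
      else acc) [])
  else if length = 9 then
    String.mk ((PySem.List.enumerate cleaned).foldl (fun acc p =>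
      if p.1 ∈ [(0:Int),1,4] then acc ++ [pvMapN2L.getD p.2 p.2]
      else if p.1 ∈ [(2:Int),3,5,6,7,8] then acc ++ [pvMapL2N.getD p.2 p.2]
      else acc) [])
  else
    String.mk cleaned

-- ===== PORT B =====
-- str.translate(table) on the allowed alphabet = map the per-char table lookup over the string.
def clean_and_correct_alt (text : String) : String :=
  let cleaned : List Char := (PySem.Str.upper text).toList.filter (fun ch => pvAllowed.contains ch)
  let n := cleaned.length
  if ¬(n = 9 ∨ n = 10) then String.mk cleaned
  else
    let letters := cleaned.map (fun c => pvMapN2L.getD c c)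
    let digits := cleaned.map (fun c => pvMapL2N.getD c c)
    let cut := n - 4
    String.mk (letters.take 2 ++ ((digits.drop 2).take 2) ++ ((letters.drop 4).take (cut - 4)) ++ digits.drop cut)

-- ===== PRECONDITION & SPEC =====
def Spec_clean_and_correct (text : String) (out : String) : Prop := out = clean_and_correct_alt text
instance (text : String) (out : String) : Decidable (Spec_clean_and_correct text out) := by unfold Spec_clean_and_correct; infer_instance

-- ===== CLAIM (what is proved, stated in full; the proofs are below) =====
def Claim_equal_clean_and_correct : Prop := ∀ (text : String), Dom_clean_and_correct text → Spec_clean_and_correct text (clean_and_correct text)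

-- ===== LEMMAS AND PROOFS =====

theorem pv_len10 (a b c d e f g h i j : Char) :
    String.mk ((PySem.List.enumerate [a,b,c,d,e,f,g,h,i,j]).foldl (fun acc p =>
      if p.1 ∈ [(0:Int),1,4,5] then acc ++ [pvMapN2L.getD p.2 p.2]
      else if p.1 ∈ [(2:Int),3,6,7,8,9] then acc ++ [pvMapL2N.getD p.2 p.2]
      else acc) [])
    = (let letters := [a,b,c,d,e,f,g,h,i,j].map (fun c => pvMapN2L.getD c c)
       let digits := [a,b,c,d,e,f,g,h,i,j].map (fun c => pvMapL2N.getD c c)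
       String.mk (letters.take 2 ++ ((digits.drop 2).take 2) ++ ((letters.drop 4).take 2) ++ digits.drop 6)) := by
  simp [PySem.List.enumerate]

theorem pv_len9 (a b c d e f g h i : Char) :
    String.mk ((PySem.List.enumerate [a,b,c,d,e,f,g,h,i]).foldl (fun acc p =>
      if p.1 ∈ [(0:Int),1,4] then acc ++ [pvMapN2L.getD p.2 p.2]
      else if p.1 ∈ [(2:Int),3,5,6,7,8] then acc ++ [pvMapL2N.getD p.2 p.2]
      else acc) [])
    = (let letters := [a,b,c,d,e,f,g,h,i].map (fun c => pvMapN2L.getD c c)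
       let digits := [a,b,c,d,e,f,g,h,i].map (fun c => pvMapL2N.getD c c)
       String.mk (letters.take 2 ++ ((digits.drop 2).take 2) ++ ((letters.drop 4).take 1) ++ digits.drop 5)) := by
  simp [PySem.List.enumerate]

theorem pv_main (cs : List Char) :
    (if cs.length = 10 then
      String.mk ((PySem.List.enumerate cs).foldl (fun acc p =>
        if p.1 ∈ [(0:Int),1,4,5] then acc ++ [pvMapN2L.getD p.2 p.2]
        else if p.1 ∈ [(2:Int),3,6,7,8,9] then acc ++ [pvMapL2N.getD p.2 p.2]
        else acc) [])
    else if cs.length = 9 then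
      String.mk ((PySem.List.enumerate cs).foldl (fun acc p =>
        if p.1 ∈ [(0:Int),1,4] then acc ++ [pvMapN2L.getD p.2 p.2]
        else if p.1 ∈ [(2:Int),3,5,6,7,8] then acc ++ [pvMapL2N.getD p.2 p.2]
        else acc) [])
    else
      String.mk cs)
    =
    (if ¬(cs.length = 9 ∨ cs.length = 10) then String.mk cs
    else
      let letters := cs.map (fun c => pvMapN2L.getD c c)
      let digits := cs.map (fun c => pvMapL2N.getD c c)
      let cut := cs.length - 4
      String.mk (letters.take 2 ++ ((digits.drop 2).take 2) ++ ((letters.drop 4).take (cut - 4)) ++ digits.drop cut)) := by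
  by_cases h10 : cs.length = 10
  · rw [if_pos h10, if_neg (by omega)]
    obtain ⟨a,b,c,d,e,f,g,h,i,j,rfl⟩ :
        ∃ a b c d e f g h i j, cs = [a,b,c,d,e,f,g,h,i,j] := by
      rcases cs with _|⟨a,_|⟨b,_|⟨c,_|⟨d,_|⟨e,_|⟨f,_|⟨g,_|⟨h,_|⟨i,_|⟨j,_|⟨k,t⟩⟩⟩⟩⟩⟩⟩⟩⟩⟩⟩ <;>
        simp_all
    simpa using pv_len10 a b c d e f g h i j
  · by_cases h9 : cs.length = 9
    · rw [if_neg h10, if_pos h9, if_neg (by omega)]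
      obtain ⟨a,b,c,d,e,f,g,h,i,rfl⟩ :
          ∃ a b c d e f g h i, cs = [a,b,c,d,e,f,g,h,i] := by
        rcases cs with _|⟨a,_|⟨b,_|⟨c,_|⟨d,_|⟨e,_|⟨f,_|⟨g,_|⟨h,_|⟨i,_|⟨j,t⟩⟩⟩⟩⟩⟩⟩⟩⟩⟩ <;>
          simp_all
      simpa using pv_len9 a b c d e f g h i
    · rw [if_neg h10, if_neg h9, if_pos (by omega)]

-- ===== VERDICT (by name: the statement is the Claim_ definition above) =====
theorem clean_and_correct_spec : Claim_equal_clean_and_correct := by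
  intro text _
  unfold Spec_clean_and_correct clean_and_correct clean_and_correct_alt
  exact pv_main _
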